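-- pv_equiv track=rewrite | github.com/FactorBioscience/FactorBioscience | generalAlignment.py | scoreFragments
-- ===== SOURCE A (Python) =====
-- def scoreFragments(sequence,fragments):
-- 	#Read all of the alignments as a list
-- 	outStr = ''
-- 	for i,referenceBase in enumerate(sequence):
-- 		outVal = 0
-- 		for fragmentGroup in fragments:
-- 			if fragmentGroup[2][i] == '*':
-- 				outVal += 1
-- 		outStr += str(outVal)
-- 	#Calculate longest fragment by locating all of the zeros in the score string
-- 	return outStr
-- ===== SOURCE B (Python) =====
-- def scoreFragments(sequence, fragments):
--     counts = [0] * len(sequence)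
--     for fragmentGroup in fragments:
--         frag = fragmentGroup[2]
--         counts = [c + (frag[i] == '*') for i, c in enumerate(counts)]
--     return ''.join(str(c) for c in counts)
-- ===== Notes on version B (the rewrite author's own statement) =====
-- stated objective: alternative
-- what changed: Transposed the traversal: instead of recomputing one column count at a time (column-major, rebuilding the string by repeated +=), B sweeps fragment-major, maintaining a full per-column counts array updated once per fragment, then renders it with a single join.
import Mathlib
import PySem

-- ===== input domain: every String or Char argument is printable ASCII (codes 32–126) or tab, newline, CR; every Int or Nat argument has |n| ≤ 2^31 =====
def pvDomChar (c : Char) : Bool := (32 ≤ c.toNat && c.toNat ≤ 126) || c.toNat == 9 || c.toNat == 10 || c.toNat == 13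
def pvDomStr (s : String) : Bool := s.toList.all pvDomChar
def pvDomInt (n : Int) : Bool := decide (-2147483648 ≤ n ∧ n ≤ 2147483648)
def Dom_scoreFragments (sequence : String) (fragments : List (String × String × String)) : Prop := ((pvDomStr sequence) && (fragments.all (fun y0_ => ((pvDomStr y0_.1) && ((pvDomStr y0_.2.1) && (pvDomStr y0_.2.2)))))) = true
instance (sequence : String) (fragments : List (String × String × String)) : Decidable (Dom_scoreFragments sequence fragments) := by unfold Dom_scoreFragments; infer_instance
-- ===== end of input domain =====

-- B changes the traversal order (fragment-major with a per-column counts array instead of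
-- column-major recomputation); same asymptotic cost, objective: alternative decomposition.

-- ===== PORT A =====
-- column-major: for each (i, base) in enumerate(sequence), count '*' at column i over fragments, append str(count)
def scoreFragments (sequence : String) (fragments : List (String × String × String)) : String :=
  (PySem.List.enumerate sequence.toList 0).foldl
    (fun outStr p =>
      let outVal : Int := fragments.foldl
        (fun outVal fragmentGroup =>
          if PySem.Str.pyGet? fragmentGroup.2.2 p.1 = some '*' then outVal + 1 else outVal) 0
      outStr ++ PySem.Int.toStr outVal)
    ""

-- ===== PORT B =====
-- fragment-major: maintain counts = [0]*len(sequence); for each fragment add its '*' columns; join at the end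
def scoreFragments_alt (sequence : String) (fragments : List (String × String × String)) : String :=
  let counts : List Int := fragments.foldl
    (fun counts fragmentGroup =>
      (PySem.List.enumerate counts 0).map
        (fun p => p.2 + (if PySem.Str.pyGet? fragmentGroup.2.2 p.1 = some '*' then 1 else 0)))
    (List.replicate sequence.toList.length (0 : Int))
  PySem.Str.join "" (counts.map PySem.Int.toStr)

-- ===== PRECONDITION & SPEC =====
-- Pre_ excludes exactly the inputs where Python A raises IndexError: some fragment's third string
-- is shorter than sequence (both A and B raise there).
def Pre_scoreFragments (sequence : String) (fragments : List (String × String × String)) : Prop :=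
  ∀ fg ∈ fragments, sequence.toList.length ≤ fg.2.2.toList.length
instance (sequence : String) (fragments : List (String × String × String)) : Decidable (Pre_scoreFragments sequence fragments) := by unfold Pre_scoreFragments; infer_instance
def pvWitness_scoreFragments : String × (List (String × String × String)) :=
  ("AC", [("a", "b", "*-"), ("c", "d", "**")])

def Spec_scoreFragments (sequence : String) (fragments : List (String × String × String)) (out : String) : Prop := out = scoreFragments_alt sequence fragments
instance (sequence : String) (fragments : List (String × String × String)) (out : String) : Decidable (Spec_scoreFragments sequence fragments out) := by unfold Spec_scoreFragments; infer_instance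

-- ===== CLAIM (what is proved, stated in full; the proofs are below) =====
def Claim_equal_scoreFragments : Prop := ∀ (sequence : String) (fragments : List (String × String × String)), Dom_scoreFragments sequence fragments → Pre_scoreFragments sequence fragments → Spec_scoreFragments sequence fragments (scoreFragments sequence fragments)

-- ===== LEMMAS AND PROOFS =====

-- per-column '*' count over a list of fragments (same fold as port A's inner loop)
def pvColCnt (fs : List (String × String × String)) (i : Int) : Int :=
  fs.foldl (fun outVal fg => if PySem.Str.pyGet? fg.2.2 i = some '*' then outVal + 1 else outVal) 0

theorem pvFoldShift (fs : List (String × String × String)) (i : Int) (a : Int) :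
    fs.foldl (fun v fg => if PySem.Str.pyGet? fg.2.2 i = some '*' then v + 1 else v) a
      = a + pvColCnt fs i := by
  induction fs generalizing a with
  | nil => simp [pvColCnt]
  | cons fg fs ih =>
    simp only [pvColCnt, List.foldl_cons]
    rw [ih, ih]
    split_ifs <;> ring

theorem pvEnumMap {α β : Type} (f : α → β) (l : List α) (s : Int) :
    PySem.List.enumerate (l.map f) s = (PySem.List.enumerate l s).map (fun p => (p.1, f p.2)) := by
  induction l generalizing s with
  | nil => simp [PySem.List.enumerate_nil]
  | cons x xs ih => simp [PySem.List.enumerate_cons, ih]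

theorem pvEnumRange (n : Nat) :
    PySem.List.enumerate (List.range n) 0
      = (List.range n).map (fun (k : Nat) => ((k : Int), k)) := by
  induction n with
  | zero => simp [PySem.List.enumerate_nil]
  | succ n ih =>
    rw [List.range_succ, PySem.List.enumerate_append, ih]
    simp [PySem.List.enumerate_cons, PySem.List.enumerate_nil]

theorem pvCountsInv (fs : List (String × String × String)) (n : Nat) (h : Nat → Int) :
    fs.foldl
      (fun counts fg => (PySem.List.enumerate counts 0).map
        (fun p => p.2 + (if PySem.Str.pyGet? fg.2.2 p.1 = some '*' then 1 else 0)))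
      ((List.range n).map h)
      = (List.range n).map (fun k => h k + pvColCnt fs (k : Int)) := by
  induction fs generalizing h with
  | nil => simp [pvColCnt]
  | cons fg fs ih =>
    rw [List.foldl_cons, pvEnumMap, pvEnumRange, List.map_map, List.map_map]
    have hstep : (((fun (p : Int × Int) => p.2 + (if PySem.Str.pyGet? fg.2.2 p.1 = some '*' then 1 else 0))
          ∘ (fun (p : Int × Nat) => (p.1, h p.2))) ∘ (fun (k : Nat) => ((k : Int), k)))
        = fun (k : Nat) => h k + (if PySem.Str.pyGet? fg.2.2 (k : Int) = some '*' then 1 else 0) := by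
      funext k; rfl
    rw [hstep, ih]
    apply List.map_congr_left
    intro k _
    have hc : pvColCnt (fg :: fs) (k : Int)
        = (if PySem.Str.pyGet? fg.2.2 (k : Int) = some '*' then (0 : Int) + 1 else 0)
            + pvColCnt fs (k : Int) := by
      rw [pvColCnt, List.foldl_cons, pvFoldShift]
    rw [hc]
    split_ifs <;> ring

theorem pvJoinEmpty (ps : List (List Char)) : PySem.Chars.join [] ps = ps.flatten := by
  induction ps with
  | nil => simp [PySem.Chars.join_nil]
  | cons p rest ih =>
    cases rest with
    | nil => simp [PySem.Chars.join_singleton]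
    | cons q r => rw [PySem.Chars.join_cons_cons]; simp [ih]

theorem pvFoldAppend (l : List (Int × Char)) (g : Int → Int) (acc : String) :
    (l.foldl (fun s p => s ++ PySem.Int.toStr (g p.1)) acc).toList
      = acc.toList ++ (l.map (fun p => (PySem.Int.toStr (g p.1)).toList)).flatten := by
  induction l generalizing acc with
  | nil => simp
  | cons x xs ih => simp [ih, String.toList_append]

theorem sf_main (sequence : String) (fragments : List (String × String × String)) :
    scoreFragments sequence fragments = scoreFragments_alt sequence fragments := by
  apply String.toList_inj.mp
  show ((PySem.List.enumerate sequence.toList 0).foldl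
          (fun outStr p => outStr ++ PySem.Int.toStr (pvColCnt fragments p.1)) "").toList
      = (PySem.Str.join ""
          ((fragments.foldl
              (fun counts fragmentGroup => (PySem.List.enumerate counts 0).map
                (fun p => p.2 + (if PySem.Str.pyGet? fragmentGroup.2.2 p.1 = some '*' then 1 else 0)))
              (List.replicate sequence.toList.length (0 : Int))).map PySem.Int.toStr)).toList
  rw [show (List.replicate sequence.toList.length (0 : Int))
        = (List.range sequence.toList.length).map (fun _ => (0 : Int)) by simp]
  rw [pvCountsInv, pvFoldAppend, PySem.Str.toList_join, List.map_map,
      show ("".toList : List Char) = [] from rfl, pvJoinEmpty]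
  have hmap : (PySem.List.enumerate sequence.toList 0).map
        (fun p => (PySem.Int.toStr (pvColCnt fragments p.1)).toList)
      = ((List.range sequence.toList.length).map (fun (k : Nat) => (k : Int))).map
        (fun i => (PySem.Int.toStr (pvColCnt fragments i)).toList) := by
    have h1 : (PySem.List.enumerate sequence.toList 0).map
          (fun p => (PySem.Int.toStr (pvColCnt fragments p.1)).toList)
        = ((PySem.List.enumerate sequence.toList 0).map (fun p => p.1)).map
          (fun i => (PySem.Int.toStr (pvColCnt fragments i)).toList) := by
      rw [List.map_map]; rfl
    rw [h1, PySem.List.map_fst_enumerate]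
    simp only [zero_add]
    rw [PySem.List.pyRange_zero_natCast]
  rw [hmap, List.map_map, List.map_map]
  apply congrArg List.flatten
  apply List.map_congr_left
  intro k _
  simp [Function.comp_def, PySem.Int.toStr]

-- ===== VERDICT (by name: the statement is the Claim_ definition above) =====
theorem scoreFragments_spec : Claim_equal_scoreFragments := by
  intro s f _ _
  unfold Spec_scoreFragments
  exact sf_main s f
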